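-- pv_equiv track=rewrite | github.com/raj713335/LeetCode | Easy/2119 A Number After a Double Reversal.py | isSameAfterReversals
-- ===== SOURCE A (Python) =====
-- def isSameAfterReversals(num: int) -> bool:
--
--     if len(str(num)) == 1:
--         return True
--     reversed1 = list(str(num)[::-1])
--     count = 0
--     for i in range(0, len(reversed1)):
--         if reversed1[i] == "0":
--             count +=1
--         else:
--             break
--     reversed2 = reversed1[count:][::-1]
--     count = 0
--     for i in range(0, len(reversed2)):
--         if reversed2[i] == "0":
--             count += 1
--         else:
--             break
--
--     reversed2 = reversed2[count:]
--
--     if str(num) == "".join(reversed2):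
--         return True
--     else:
--         return False
-- ===== SOURCE B (Python) =====
-- def isSameAfterReversals(num: int) -> bool:
--     # A double reversal strips trailing zeros and nothing else, so the
--     # number survives iff it is 0 or does not end in a zero digit.
--     return num == 0 or num % 10 != 0
-- ===== Notes on version B (the rewrite author's own statement) =====
-- stated objective: simpler
-- what changed: Replaces the whole string simulation (build str, reverse it, strip zeros, reverse back, strip again, compare strings) with a constant-time arithmetic test of the last decimal digit, since a double reversal changes a number exactly when it has a trailing zero digit.
import Mathlib
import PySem

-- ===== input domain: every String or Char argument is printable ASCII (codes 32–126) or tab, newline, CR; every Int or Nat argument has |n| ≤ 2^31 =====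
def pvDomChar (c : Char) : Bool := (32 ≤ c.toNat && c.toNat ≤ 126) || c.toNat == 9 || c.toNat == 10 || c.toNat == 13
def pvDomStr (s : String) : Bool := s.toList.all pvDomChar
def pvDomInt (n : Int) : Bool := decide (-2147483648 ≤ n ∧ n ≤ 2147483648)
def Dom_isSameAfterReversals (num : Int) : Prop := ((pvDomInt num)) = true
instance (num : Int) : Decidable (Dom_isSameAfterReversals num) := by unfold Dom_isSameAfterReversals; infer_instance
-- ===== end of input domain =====

-- B replaces the string-reversal simulation with the arithmetic closed form
-- 'num == 0 or num % 10 != 0' (simpler; same return value everywhere).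

-- ===== PORT A =====
-- the 'for i in range(...): if reversed[i] == "0": count += 1 else: break' loop of A
def pvCountZeros : List Char → Nat
  | [] => 0
  | c :: rest => if c = '0' then pvCountZeros rest + 1 else 0

def isSameAfterReversals (num : Int) : Bool :=
  -- str(num) as its list of characters (exact: PySem.Int.toChars = str(num))
  let s := PySem.Int.toChars num
  if s.length = 1 then true
  else
    -- list(str(num)[::-1])  (a reversed list of the characters — exact)
    let reversed1 := s.reverse
    let count := pvCountZeros reversed1
    -- reversed1[count:][::-1]  (count : Nat, so drop is exact)
    let reversed2 := (reversed1.drop count).reverse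
    let count2 := pvCountZeros reversed2
    let reversed2' := reversed2.drop count2
    -- str(num) == "".join(reversed2)  (character-list equality — exact)
    if s = reversed2' then true else false

-- ===== PORT B =====
def isSameAfterReversals_alt (num : Int) : Bool :=
  num == 0 || PySem.Int.mod num 10 != 0

-- ===== PRECONDITION & SPEC =====
def Spec_isSameAfterReversals (num : Int) (out : Bool) : Prop := out = isSameAfterReversals_alt num
instance (num : Int) (out : Bool) : Decidable (Spec_isSameAfterReversals num out) := by unfold Spec_isSameAfterReversals; infer_instance

-- ===== CLAIM (what is proved, stated in full; the proofs are below) =====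
def Claim_equal_isSameAfterReversals : Prop := ∀ (num : Int), Dom_isSameAfterReversals num → Spec_isSameAfterReversals num (isSameAfterReversals num)

-- ===== LEMMAS AND PROOFS =====

-- toDigitsCore with a non-empty accumulator just appends the accumulator
lemma pv_core_shift (f : Nat) : ∀ (n : Nat) (ds : List Char),
    Nat.toDigitsCore 10 f n ds = Nat.toDigitsCore 10 f n [] ++ ds := by
  induction f with
  | zero => intro n ds; simp [Nat.toDigitsCore]
  | succ f ih =>
    intro n ds
    rw [Nat.toDigitsCore.eq_def, Nat.toDigitsCore.eq_def]
    by_cases h : n / 10 = 0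
    · simp [h]
    · simp only [if_neg h]
      rw [ih (n / 10) ((n % 10).digitChar :: ds), ih (n / 10) [(n % 10).digitChar]]
      simp

lemma pv_core_ne_nil (f n : Nat) (ds : List Char) (hf : 0 < f) :
    Nat.toDigitsCore 10 f n ds ≠ [] := by
  obtain ⟨f, rfl⟩ : ∃ f', f = f' + 1 := ⟨f - 1, by omega⟩
  rw [Nat.toDigitsCore.eq_def]
  by_cases h : n / 10 = 0
  · simp [h]
  · simp only [if_neg h]
    rw [pv_core_shift]
    simp

lemma pv_digitChar_eq_zero_iff (k : Nat) (hk : k < 10) : Nat.digitChar k = '0' ↔ k = 0 := by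
  interval_cases k <;> simp [Nat.digitChar]

-- str(m) for a natural m ends with the character of its last digit
lemma pv_toDigits_last (m : Nat) :
    ∃ pre, Nat.toDigits 10 m = pre ++ [Nat.digitChar (m % 10)] := by
  unfold Nat.toDigits
  rw [Nat.toDigitsCore.eq_def]
  by_cases h : m / 10 = 0
  · exact ⟨[], by simp [h]⟩
  · refine ⟨Nat.toDigitsCore 10 m (m / 10) [], ?_⟩
    simp only [if_neg h]
    exact pv_core_shift m (m / 10) [(m % 10).digitChar]

-- str(m) for 0 < m never starts with '0'
lemma pv_core_head_ne_zero (f : Nat) : ∀ (n : Nat), 0 < n → n < 10 ^ f →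
    (Nat.toDigitsCore 10 f n []).head? ≠ some '0' := by
  induction f with
  | zero => intro n h1 h2; omega
  | succ f ih =>
    intro n h1 h2
    rw [Nat.toDigitsCore.eq_def]
    by_cases h : n / 10 = 0
    · have hn : n < 10 := by omega
      have : n % 10 = n := Nat.mod_eq_of_lt hn
      simp only [if_pos h, List.head?_cons, this]
      intro hc
      have := (pv_digitChar_eq_zero_iff n hn).mp (by injection hc)
      omega
    · simp only [if_neg h]
      rw [pv_core_shift]
      have hne := pv_core_ne_nil f (n / 10) [] (by by_contra hf; simp at hf; subst hf; simp at h2; omega)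
      rw [List.head?_append_of_ne_nil _ hne]
      have hdiv : n / 10 < 10 ^ f := by
        have : n < 10 ^ f * 10 := by rw [← pow_succ]; exact h2
        omega
      exact ih (n / 10) (by omega) hdiv

lemma pv_toDigits_head_ne_zero (m : Nat) (hm : 0 < m) :
    (Nat.toDigits 10 m).head? ≠ some '0' := by
  unfold Nat.toDigits
  exact pv_core_head_ne_zero (m + 1) m hm
    (lt_of_lt_of_le (Nat.lt_pow_self (by norm_num)) (Nat.pow_le_pow_right (by norm_num) (by omega)))

-- m ≥ 10 has at least two digits
lemma pv_toDigits_len2 (m : Nat) (hm : 10 ≤ m) : 2 ≤ (Nat.toDigits 10 m).length := by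
  unfold Nat.toDigits
  rw [Nat.toDigitsCore.eq_def]
  have h : ¬ m / 10 = 0 := by omega
  simp only [if_neg h]
  rw [pv_core_shift]
  have hne := pv_core_ne_nil m (m / 10) [] (by omega)
  have := List.length_pos_iff.mpr hne
  simp [List.length_append]
  omega

lemma pv_countZeros_le (xs : List Char) : pvCountZeros xs ≤ xs.length := by
  induction xs with
  | nil => simp [pvCountZeros]
  | cons c rest ih => by_cases h : c = '0' <;> simp [pvCountZeros, h] <;> omega

lemma pv_countZeros_cons_ne (c : Char) (xs : List Char) (h : c ≠ '0') :
    pvCountZeros (c :: xs) = 0 := by simp [pvCountZeros, h]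

-- dvd ↔ last digit char is '0'
lemma pv_natAbs_mod (num : Int) : (10 : Int) ∣ num ↔ num.natAbs % 10 = 0 := by
  rw [← Int.natAbs_dvd_natAbs]
  simp [Nat.dvd_iff_mod_eq_zero]

-- the characters of str(num)
lemma pv_toChars_eq (num : Int) : PySem.Int.toChars num =
    (if num < 0 then ['-'] else []) ++ Nat.toDigits 10 num.natAbs := by
  unfold PySem.Int.toChars
  by_cases h : num < 0
  · simp [h, Int.natAbs]
  · simp only [if_neg h]
    congr 1
    omega

lemma pv_countZeros_eq_zero_of_head (xs : List Char) (h : xs.head? ≠ some '0') :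
    pvCountZeros xs = 0 := by
  cases xs with
  | nil => rfl
  | cons c rest =>
    apply pv_countZeros_cons_ne
    intro hc; exact h (by simp [hc])

-- ===== main case analysis =====
lemma pv_main (num : Int) : isSameAfterReversals num = isSameAfterReversals_alt num := by
  by_cases h0 : num = 0
  · subst h0; decide
  have hm0 : 0 < num.natAbs := Int.natAbs_pos.mpr h0
  obtain ⟨pre, hD⟩ := pv_toDigits_last num.natAbs
  have hchars := pv_toChars_eq num
  have hlt : num.natAbs % 10 < 10 := Nat.mod_lt _ (by norm_num)
  by_cases hdvd : (10 : Int) ∣ num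
  · -- last digit is zero: A compares lists of different lengths → false; B is false
    have hm10 : num.natAbs % 10 = 0 := (pv_natAbs_mod num).mp hdvd
    have hB : isSameAfterReversals_alt num = false := by
      simp [isSameAfterReversals_alt, h0]
      exact hdvd
    rw [hB]
    have hdl : Nat.digitChar (num.natAbs % 10) = '0' := by rw [hm10]; rfl
    have hlen2 : 2 ≤ (Nat.toDigits 10 num.natAbs).length :=
      pv_toDigits_len2 _ (by
        have : (10 : Nat) ∣ num.natAbs := Nat.dvd_of_mod_eq_zero hm10
        omega)
    unfold isSameAfterReversals
    simp only []
    have hslen : 2 ≤ (PySem.Int.toChars num).length := by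
      rw [hchars, List.length_append]; omega
    rw [if_neg (by omega)]
    -- the reversed string starts with '0', so count ≥ 1 and the candidate is shorter
    have hrev : (PySem.Int.toChars num).reverse =
        '0' :: (((if num < 0 then ['-'] else []) ++ pre).reverse) := by
      rw [hchars, hD, ← List.append_assoc, List.reverse_append, hdl]
      simp
    have hcount : 1 ≤ pvCountZeros ((PySem.Int.toChars num).reverse) := by
      rw [hrev]; simp [pvCountZeros]
    rw [if_neg]
    intro heq
    have h1 := congrArg List.length heq
    have hc1le := pv_countZeros_le ((PySem.Int.toChars num).reverse)
    simp only [List.length_drop, List.length_reverse] at h1 hc1le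
    omega
  · -- last digit nonzero: A strips nothing → true; B is true
    have hm10 : num.natAbs % 10 ≠ 0 := fun h => hdvd ((pv_natAbs_mod num).mpr h)
    have hB : isSameAfterReversals_alt num = true := by
      simp [isSameAfterReversals_alt]
      exact Or.inr hdvd
    rw [hB]
    have hdl : Nat.digitChar (num.natAbs % 10) ≠ '0' := by
      intro h; exact hm10 ((pv_digitChar_eq_zero_iff _ hlt).mp h)
    have hrev : (PySem.Int.toChars num).reverse =
        Nat.digitChar (num.natAbs % 10) :: (((if num < 0 then ['-'] else []) ++ pre).reverse) := by
      rw [hchars, hD, ← List.append_assoc, List.reverse_append]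
      simp
    have hcount : pvCountZeros ((PySem.Int.toChars num).reverse) = 0 := by
      rw [hrev]; exact pv_countZeros_cons_ne _ _ hdl
    have hhead : (PySem.Int.toChars num).head? ≠ some '0' := by
      rw [hchars]
      by_cases hneg : num < 0
      · simp [hneg]
      · simp only [if_neg hneg, List.nil_append]
        exact pv_toDigits_head_ne_zero _ hm0
    have hcount2 : pvCountZeros (PySem.Int.toChars num) = 0 :=
      pv_countZeros_eq_zero_of_head _ hhead
    unfold isSameAfterReversals
    simp only []
    by_cases hlen : (PySem.Int.toChars num).length = 1
    · rw [if_pos hlen]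
    · rw [if_neg hlen, hcount, List.drop_zero, List.reverse_reverse, hcount2,
        List.drop_zero, if_pos rfl]

-- ===== VERDICT (by name: the statement is the Claim_ definition above) =====
theorem isSameAfterReversals_spec : Claim_equal_isSameAfterReversals := by
  intro num _
  unfold Spec_isSameAfterReversals
  exact pv_main num
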